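-- pv_equiv track=rewrite | github.com/reamac-repo/remac-repo | utils/plan_utils.py | merge_plans_with_last
-- ===== SOURCE A (Python) =====
-- def merge_plans_with_last(history_plans):
--     final_plan = []
--     for plan in history_plans:
--         if plan:  # check whether plan is empty
--             current_action = plan[0]
--             if not final_plan or current_action != final_plan[-1]:
--                 final_plan.append(current_action)
--
--     # handle last plan
--     if history_plans:
--         last_plan = history_plans[-1]
--         if len(last_plan) > 0:
--             remaining_actions = last_plan[1:]
--             for action in remaining_actions:
--                 if not final_plan or action != final_plan[-1]:
--                     final_plan.append(action)
--
--     return final_plan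
-- ===== SOURCE B (Python) =====
-- def merge_plans_with_last(history_plans):
--     # phase 1: raw sequence = first action of each earlier non-empty plan,
--     # then the entire last plan (its head plus its remainder)
--     raw = [plan[0] for plan in history_plans[:-1] if plan]
--     if history_plans:
--         raw += history_plans[-1]
--     # phase 2: emit one representative per run of equal consecutive actions,
--     # advancing an index past each whole run
--     out = []
--     n = len(raw)
--     i = 0
--     while i < n:
--         out.append(raw[i])
--         j = i + 1
--         while j < n and raw[j] == raw[i]:
--             j += 1
--         i = j
--     return out
-- ===== Notes on version B (the rewrite author's own statement) =====
-- stated objective: alternative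
-- what changed: B splits the work into two phases: it first materialises the raw sequence (heads of the earlier non-empty plans followed by the entire last plan), then compresses it with a run-scanning double loop whose inner index skips each whole run of equal actions, instead of A's single fused loop that dedups each item against the tail of the output it is building.
import Mathlib
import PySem

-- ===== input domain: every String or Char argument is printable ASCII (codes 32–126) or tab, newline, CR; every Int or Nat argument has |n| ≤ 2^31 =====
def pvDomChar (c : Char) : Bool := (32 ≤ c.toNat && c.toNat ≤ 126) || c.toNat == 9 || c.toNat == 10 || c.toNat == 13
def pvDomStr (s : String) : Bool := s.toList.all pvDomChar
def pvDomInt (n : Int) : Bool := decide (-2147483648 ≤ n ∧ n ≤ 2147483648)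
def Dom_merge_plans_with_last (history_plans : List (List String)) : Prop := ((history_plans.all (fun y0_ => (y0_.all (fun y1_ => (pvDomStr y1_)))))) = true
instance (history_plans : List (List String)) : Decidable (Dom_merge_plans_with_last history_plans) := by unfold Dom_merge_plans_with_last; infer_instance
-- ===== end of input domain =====

-- B gathers the raw sequence (heads of the earlier non-empty plans plus the whole last plan) in one phase, then compresses it by run-skipping index scans instead of A's fused dedup-while-append loop; same cost.


-- ===== PORT A =====
-- append action iff final_plan is empty or action differs from final_plan[-1]
-- (final_plan[-1], only evaluated when final_plan is non-empty, is getLast?)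
def mergeStep (acc : List String) (x : String) : List String :=
  if acc = [] ∨ some x ≠ acc.getLast? then acc ++ [x] else acc

-- the body of A's first loop: skip empty plans, else process plan[0]
def mergeHead (acc : List String) (plan : List String) : List String :=
  match plan with
  | [] => acc
  | x :: _ => mergeStep acc x

def merge_plans_with_last (history_plans : List (List String)) : List String :=
  let final₁ := history_plans.foldl mergeHead []
  match history_plans.getLast? with     -- `if history_plans: last_plan = history_plans[-1]`
  | none => final₁
  | some last_plan =>
    if last_plan.length > 0 then
      (last_plan.drop 1).foldl mergeStep final₁   -- last_plan[1:] and the second loop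
    else final₁

-- ===== PORT B =====
-- Source B's inner while loop: advance j past the run of actions equal to v
def skipRun (raw : List String) (v : String) (j : Nat) : Nat :=
  if h : j < raw.length ∧ raw[j]! = v then skipRun raw v (j + 1) else j
termination_by raw.length - j
decreasing_by omega

-- Source B's outer while loop needs `i < skipRun raw v (i+1)` to terminate
theorem skipRun_le (raw : List String) (v : String) (j : Nat) : j ≤ skipRun raw v j := by
  rw [skipRun]
  split
  · exact Nat.le_trans (Nat.le_succ j) (skipRun_le raw v (j + 1))
  · exact Nat.le_refl j
termination_by raw.length - j
decreasing_by omega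

-- Source B's outer while loop: emit raw[i], jump to the end of its run
def collect (raw : List String) (i : Nat) : List String :=
  if h : i < raw.length then raw[i]! :: collect raw (skipRun raw raw[i]! (i + 1)) else []
termination_by raw.length - i
decreasing_by
  have := skipRun_le raw raw[i]! (i + 1)
  omega

def merge_plans_with_last_alt (history_plans : List (List String)) : List String :=
  -- phase 1: raw = [plan[0] for plan in history_plans[:-1] if plan] + (history_plans[-1] if any)
  let raw := (history_plans.dropLast.filterMap List.head?) ++ (history_plans.getLast?.getD [])
  -- phase 2: run-skipping scan from index 0
  collect raw 0

-- ===== PRECONDITION & SPEC =====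
def Spec_merge_plans_with_last (history_plans : List (List String)) (out : List String) : Prop := out = merge_plans_with_last_alt history_plans
instance (history_plans : List (List String)) (out : List String) : Decidable (Spec_merge_plans_with_last history_plans out) := by unfold Spec_merge_plans_with_last; infer_instance

-- ===== CLAIM (what is proved, stated in full; the proofs are below) =====
def Claim_equal_merge_plans_with_last : Prop := ∀ (history_plans : List (List String)), Dom_merge_plans_with_last history_plans → Spec_merge_plans_with_last history_plans (merge_plans_with_last history_plans)

-- ===== LEMMAS AND PROOFS =====

-- consecutive-duplicate collapse, parametrised by the previous kept element
def gk (p : Option String) : List String → List String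
  | [] => []
  | x :: xs => if some x = p then gk p xs else x :: gk (some x) xs

theorem foldl_mergeStep_gk (xs : List String) : ∀ (acc : List String),
    xs.foldl mergeStep acc = acc ++ gk acc.getLast? xs := by
  induction xs with
  | nil => intro acc; simp [gk]
  | cons x xs ih =>
    intro acc
    by_cases h : acc.getLast? = some x
    · have hne : acc ≠ [] := by
        intro he; rw [he] at h; simp at h
      have hstep : mergeStep acc x = acc := by
        simp [mergeStep, hne, h]
      simp only [List.foldl_cons, hstep, ih, gk, h]
      simp
    · have hne2 : ¬ (some x = acc.getLast?) := fun hh => h (Eq.symm hh)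
      have hstep : mergeStep acc x = acc ++ [x] := by
        simp [mergeStep, hne2]
      have hlast : (acc ++ [x]).getLast? = some x := by simp
      simp only [List.foldl_cons, hstep, ih, hlast, gk, hne2]
      simp

theorem foldl_mergeHead_filterMap (plans : List (List String)) : ∀ (acc : List String),
    plans.foldl mergeHead acc = (plans.filterMap List.head?).foldl mergeStep acc := by
  induction plans with
  | nil => intro acc; simp
  | cons p ps ih =>
    intro acc
    cases p with
    | nil => simp [mergeHead, ih]
    | cons x t => simp [mergeHead, ih]

theorem mergeA_as_fold (hp : List (List String)) :
    merge_plans_with_last hp =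
      ((hp.filterMap List.head?) ++ (match hp.getLast? with
        | some l => l.drop 1
        | none => [])).foldl mergeStep [] := by
  unfold merge_plans_with_last
  rw [foldl_mergeHead_filterMap]
  cases hg : hp.getLast? with
  | none => simp
  | some last =>
    cases last with
    | nil => simp
    | cons y t => simp [List.foldl_append]

-- the two raw sequences coincide
theorem raw_eq (hp : List (List String)) :
    (hp.filterMap List.head?) ++ (match hp.getLast? with
      | some l => l.drop 1
      | none => []) =
    (hp.dropLast.filterMap List.head?) ++ (hp.getLast?.getD []) := by
  induction hp using List.reverseRecOn with
  | nil => simp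
  | append_singleton ys l _ =>
    cases l <;> simp [List.filterMap_append]

-- the list-level shape of B's run-skipping scan
def cr : List String → List String
  | [] => []
  | x :: xs => x :: cr (xs.dropWhile (fun y => y == x))
termination_by l => l.length
decreasing_by
  have := List.length_dropWhile_le (fun y => y == x) xs
  simp; omega

theorem drop_skipRun (raw : List String) (v : String) (j : Nat) :
    raw.drop (skipRun raw v j) = (raw.drop j).dropWhile (fun y => y == v) := by
  rw [skipRun]
  split
  · next h =>
    rw [drop_skipRun raw v (j + 1)]
    rw [List.drop_eq_getElem_cons h.1]
    have hv : raw[j] = v := by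
      have := h.2; rwa [getElem!_pos raw j h.1] at this
    simp [hv]
  · next h =>
    by_cases hj : j < raw.length
    · have hv : ¬ raw[j] = v := by
        have := fun hh => h ⟨hj, hh⟩
        rwa [getElem!_pos raw j hj] at this
      conv_rhs => rw [List.drop_eq_getElem_cons hj, List.dropWhile_cons]
      rw [if_neg (by simp [hv]), ← List.drop_eq_getElem_cons hj]
    · rw [List.drop_eq_nil_of_le (Nat.le_of_not_lt hj)]
      simp
termination_by raw.length - j
decreasing_by omega

theorem collect_eq_cr (raw : List String) (i : Nat) : collect raw i = cr (raw.drop i) := by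
  rw [collect]
  split
  · next h =>
    rw [collect_eq_cr raw (skipRun raw raw[i]! (i + 1)), drop_skipRun]
    rw [getElem!_pos raw i h]
    rw [List.drop_eq_getElem_cons h]
    simp only [cr]
  · next h =>
    rw [List.drop_eq_nil_of_le (Nat.le_of_not_lt h)]
    simp [cr]
termination_by raw.length - i
decreasing_by
  have := skipRun_le raw raw[i]! (i + 1)
  omega

theorem gk_some (xs : List String) : ∀ (x : String),
    gk (some x) xs = gk none (xs.dropWhile (fun y => y == x)) := by
  induction xs with
  | nil => intro x; simp [gk]
  | cons y ys ih =>
    intro x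
    by_cases h : y = x
    · subst h
      simp [gk, ih]
    · simp [gk, h]

theorem cr_eq_gk (xs : List String) : cr xs = gk none xs := by
  cases xs with
  | nil => simp [cr, gk]
  | cons x t =>
    simp only [cr]
    rw [cr_eq_gk (t.dropWhile (fun y => y == x)), ← gk_some]
    simp [gk]
termination_by xs.length
decreasing_by
  have := List.length_dropWhile_le (fun y => y == x) t
  simp; omega

-- ===== VERDICT (by name: the statement is the Claim_ definition above) =====
theorem merge_plans_with_last_spec : Claim_equal_merge_plans_with_last := by
  intro hp _
  unfold Spec_merge_plans_with_last merge_plans_with_last_alt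
  rw [mergeA_as_fold, foldl_mergeStep_gk, raw_eq, collect_eq_cr, List.drop_zero, cr_eq_gk]
  simp
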